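-- pv_equiv track=rewrite | github.com/bruiken/AoC2022 | day08/day8.2.py | create_view_map_2d
-- ===== SOURCE A (Python) =====
-- def create_view_map_2d(trees):
--     result = [0]*len(trees)
--     for i in range(len(trees)):
--         for j in range(1, i):
--             if trees[i] > trees[i-j]:
--                 result[i] += 1
--             else:
--                 break
--         if i > 0:
--             result[i] += 1
--     return result
-- ===== SOURCE B (Python) =====
-- def create_view_map_2d(trees):
--     result = []
--     stack = []  # indices with non-increasing tree heights (bottom to top... top = last)
--     for i, v in enumerate(trees):
--         while stack and trees[stack[-1]] < v:
--             stack.pop()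
--         result.append(i - stack[-1] if stack else i)
--         stack.append(i)
--     return result
-- ===== Notes on version B (the rewrite author's own statement) =====
-- stated objective: faster
-- what changed: Replaced A's quadratic per-index backward scan (inner loop with break) by a single left-to-right pass with a monotonic stack of indices: the left viewing distance is i minus the index of the nearest previous element >= current.
import Mathlib
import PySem

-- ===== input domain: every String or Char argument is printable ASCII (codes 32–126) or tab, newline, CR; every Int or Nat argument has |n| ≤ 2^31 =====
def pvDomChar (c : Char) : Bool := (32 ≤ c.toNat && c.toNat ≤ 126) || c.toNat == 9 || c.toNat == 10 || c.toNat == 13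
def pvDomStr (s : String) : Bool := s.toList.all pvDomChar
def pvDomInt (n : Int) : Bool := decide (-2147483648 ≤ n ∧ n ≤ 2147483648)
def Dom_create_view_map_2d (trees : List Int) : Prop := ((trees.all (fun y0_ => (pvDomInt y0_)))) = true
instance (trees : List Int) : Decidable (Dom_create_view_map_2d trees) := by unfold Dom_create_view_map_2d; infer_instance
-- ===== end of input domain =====

-- B replaces A's per-index backward scan by a single left-to-right pass with a monotonic
-- stack of indices (nearest previous element ≥ current); objective: faster (O(n) vs O(n^2)).

-- ===== PORT A =====
-- inner loop `for j in range(1, i): if trees[i] > trees[i-j]: result[i] += 1 else: break`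
-- (indices i and i-j always lie in range here, so getD is exact for Python's trees[...])
def innerLoopA (trees : List Int) (i : Nat) (j : Nat) (acc : Int) : Int :=
  if j < i then
    (if trees.getD i 0 > trees.getD (i - j) 0 then innerLoopA trees i (j + 1) (acc + 1) else acc)
  else acc
termination_by i - j

def create_view_map_2d (trees : List Int) : List Int :=
  (List.range trees.length).map (fun i =>
    innerLoopA trees i 1 0 + (if 0 < i then (1 : Int) else 0))

-- ===== PORT B =====
-- `while stack and trees[stack[-1]] < v: stack.pop()`  (stack kept top-first here)
def popLoopB (trees : List Int) (v : Int) : List Nat → List Nat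
  | [] => []
  | k :: s => if trees.getD k 0 < v then popLoopB trees v s else k :: s

def mainLoopB (trees : List Int) : Nat → List Int → List Nat → List Int → List Int
  | _, [], _, acc => acc.reverse
  | i, v :: rest, s, acc =>
      let s' := popLoopB trees v s
      let d : Int := match s' with
        | [] => (i : Int)
        | k :: _ => (i : Int) - (k : Int)
      mainLoopB trees (i + 1) rest (i :: s') (d :: acc)

def create_view_map_2d_alt (trees : List Int) : List Int :=
  mainLoopB trees 0 trees [] []

-- ===== PRECONDITION & SPEC =====
def Spec_create_view_map_2d (trees : List Int) (out : List Int) : Prop := out = create_view_map_2d_alt trees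
instance (trees : List Int) (out : List Int) : Decidable (Spec_create_view_map_2d trees out) := by unfold Spec_create_view_map_2d; infer_instance

-- ===== CLAIM (what is proved, stated in full; the proofs are below) =====
def Claim_equal_create_view_map_2d : Prop := ∀ (trees : List Int), Dom_create_view_map_2d trees → Spec_create_view_map_2d trees (create_view_map_2d trees)

-- ===== LEMMAS AND PROOFS =====
-- Both ports are shown equal to `(List.range trees.length).map (specVal trees)`, where
-- `specVal trees i = i - gIdx trees trees[i] (i-1)` and `gIdx` is the greatest k in [1, i-1]
-- with trees[k] ≥ trees[i] (0 if none).  For A this is a direct induction on its inner loop;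
-- for B it is the stack invariant: after i steps the stack holds exactly the indices k < i
-- with trees[m] ≤ trees[k] for all m in (k, i), in decreasing order.

def gIdx (trees : List Int) (v : Int) : Nat → Nat
  | 0 => 0
  | k + 1 => if v ≤ trees.getD (k + 1) 0 then k + 1 else gIdx trees v k

def specVal (trees : List Int) (i : Nat) : Int :=
  (i : Int) - (gIdx trees (trees.getD i 0) (i - 1) : Int)

def survives (trees : List Int) (i k : Nat) : Bool :=
  (List.range i).all (fun m => decide (k < m → trees.getD m 0 ≤ trees.getD k 0))

def stkList (trees : List Int) (i : Nat) : List Nat :=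
  (List.range i).filter (survives trees i)

theorem innerLoopA_eq (trees : List Int) (i : Nat) :
    ∀ n j acc, i - j = n → j ≤ i →
      innerLoopA trees i j acc
        = acc + ((i : Int) - (j : Int)) - (gIdx trees (trees.getD i 0) (i - j) : Int) := by
  intro n
  induction n with
  | zero =>
    intro j acc h hj
    have hij : j = i := by omega
    subst hij
    rw [innerLoopA]
    simp [gIdx]
  | succ n ih =>
    intro j acc h hj
    have hjlt : j < i := by omega
    rw [innerLoopA, if_pos hjlt]
    obtain ⟨m, hm⟩ : ∃ m, i - j = m + 1 := ⟨i - j - 1, by omega⟩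
    rw [hm]
    by_cases hcc : trees.getD i 0 > trees.getD (m + 1) 0
    · rw [if_pos hcc, ih (j+1) (acc+1) (by omega) (by omega), gIdx, if_neg (not_le.mpr hcc)]
      have hg : i - (j+1) = m := by omega
      rw [hg]
      push_cast
      ring
    · rw [if_neg hcc, gIdx, if_pos (not_lt.mp hcc)]
      have : ((m + 1 : Nat) : Int) = (i : Int) - (j : Int) := by omega
      rw [this]; ring

theorem portA_val (trees : List Int) (i : Nat) :
    innerLoopA trees i 1 0 + (if 0 < i then (1 : Int) else 0) = specVal trees i := by
  cases i with
  | zero => simp [innerLoopA, specVal, gIdx]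
  | succ n =>
    rw [innerLoopA_eq trees (n+1) (n+1-1) 1 0 rfl (by omega), if_pos (by omega)]
    simp only [specVal, Nat.add_sub_cancel]
    push_cast
    ring

theorem portA_eq_spec (trees : List Int) :
    create_view_map_2d trees = (List.range trees.length).map (specVal trees) := by
  unfold create_view_map_2d
  exact List.map_congr_left (fun i _ => portA_val trees i)

theorem popLoopB_eq_dropWhile (trees : List Int) (v : Int) (s : List Nat) :
    popLoopB trees v s = s.dropWhile (fun k => decide (trees.getD k 0 < v)) := by
  induction s with
  | nil => rfl
  | cons k s ih =>
    by_cases h : trees.getD k 0 < v <;> simp [popLoopB, List.dropWhile_cons, h, ih]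

theorem survives_succ (trees : List Int) (i k : Nat) (h : k < i) :
    survives trees (i+1) k
      = (survives trees i k && decide (trees.getD i 0 ≤ trees.getD k 0)) := by
  simp [survives, List.range_succ, List.all_append, h]

theorem survives_self (trees : List Int) (i : Nat) :
    survives trees (i+1) i = true := by
  simp only [survives, List.all_eq_true, List.mem_range]
  intro m hm
  simp only [decide_eq_true_eq]
  omega

theorem survives_mono (trees : List Int) (i k m : Nat) (hs : survives trees i k = true)
    (hkm : k < m) (hmi : m < i) : trees.getD m 0 ≤ trees.getD k 0 := by
  simp only [survives, List.all_eq_true, List.mem_range] at hs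
  have := hs m hmi
  simpa [hkm] using this

theorem stk_sorted (trees : List Int) (i : Nat) : (stkList trees i).Pairwise (· < ·) :=
  List.Pairwise.sublist List.filter_sublist List.pairwise_lt_range

theorem dropWhile_reverse_filter (p : Nat → Bool) (l : List Nat)
    (h : l.Pairwise (fun a b => p a = true → p b = true)) :
    l.reverse.dropWhile p = (l.filter (fun k => !p k)).reverse := by
  induction l using List.reverseRecOn with
  | nil => simp
  | append_singleton ys y ih =>
    rw [List.pairwise_append] at h
    rw [List.reverse_append]
    by_cases hy : p y = true
    · simp [List.dropWhile, hy, ih h.1, List.filter_append]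
    · have hall : ∀ a ∈ ys, (!p a) = true := by
        intro a ha
        have := h.2.2 a ha y (by simp)
        simp only [Bool.not_eq_true'] at *
        cases hpa : p a with
        | false => rfl
        | true => exact absurd (this hpa) (by simpa using hy)
      simp [List.dropWhile, hy, List.filter_append, List.filter_eq_self.mpr hall]

theorem mem_stkList (trees : List Int) (i k : Nat) :
    k ∈ stkList trees i ↔ k < i ∧ survives trees i k = true := by
  simp [stkList, List.mem_filter, List.mem_range]

theorem stack_step (trees : List Int) (i : Nat) :
    popLoopB trees (trees.getD i 0) ((stkList trees i).reverse)
      = ((List.range i).filter (survives trees (i+1))).reverse := by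
  rw [popLoopB_eq_dropWhile,
    dropWhile_reverse_filter _ _ ?hpair]
  case hpair =>
    refine (stk_sorted trees i).imp_of_mem ?_
    intro a b ha hb hab hpa
    simp only [decide_eq_true_eq] at *
    have hsb : b < i := ((mem_stkList trees i b).mp hb).1
    have hsa := ((mem_stkList trees i a).mp ha).2
    exact lt_of_le_of_lt (survives_mono trees i a b hsa hab hsb) hpa
  congr 1
  unfold stkList
  rw [List.filter_filter]
  refine List.filter_congr ?_
  intro k hk
  rw [List.mem_range] at hk
  rw [survives_succ trees i k hk, ← decide_not]
  simp [not_lt, Bool.and_comm]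

theorem stk_succ (trees : List Int) (i : Nat) :
    stkList trees (i+1) = (List.range i).filter (survives trees (i+1)) ++ [i] := by
  simp [stkList, List.range_succ, List.filter_append, survives_self]

theorem gIdx_cases (trees : List Int) (v : Int) (n : Nat) :
    (gIdx trees v n = 0 ∧ ∀ k, 1 ≤ k → k ≤ n → trees.getD k 0 < v) ∨
    (1 ≤ gIdx trees v n ∧ gIdx trees v n ≤ n ∧ v ≤ trees.getD (gIdx trees v n) 0 ∧
      ∀ m, gIdx trees v n < m → m ≤ n → trees.getD m 0 < v) := by
  induction n with
  | zero => exact Or.inl ⟨rfl, fun k h1 h2 => by omega⟩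
  | succ n ih =>
    by_cases hc : v ≤ trees.getD (n+1) 0
    · right
      rw [gIdx, if_pos hc]
      exact ⟨by omega, le_refl _, hc, fun m h1 h2 => by omega⟩
    · rw [gIdx, if_neg hc]
      rcases ih with ⟨h0, hall⟩ | ⟨h1, h2, h3, h4⟩
      · left
        refine ⟨h0, fun k hk1 hk2 => ?_⟩
        rcases Nat.lt_or_ge k (n+1) with h | h
        · exact hall k hk1 (by omega)
        · have : k = n + 1 := by omega
          subst this; exact not_le.mp hc
      · right
        refine ⟨h1, by omega, h3, fun m hm1 hm2 => ?_⟩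
        rcases Nat.lt_or_ge m (n+1) with h | h
        · exact h4 m hm1 (by omega)
        · have : m = n + 1 := by omega
          subst this; exact not_le.mp hc

-- every element of the popped stack has height ≥ the current tree

theorem mem_filter_succ (trees : List Int) (i k : Nat)
    (hk : k ∈ (List.range i).filter (survives trees (i+1))) :
    k < i ∧ trees.getD i 0 ≤ trees.getD k 0 := by
  rw [List.mem_filter, List.mem_range] at hk
  exact ⟨hk.1, survives_mono trees (i+1) k i hk.2 hk.1 (by omega)⟩

theorem maxLast (l : List Nat) (K : Nat) (hs : l.Pairwise (· < ·)) (hK : K ∈ l)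
    (hmax : ∀ x ∈ l, x ≤ K) : l.reverse.head? = some K := by
  rw [List.head?_reverse]
  have hne : l ≠ [] := List.ne_nil_of_mem hK
  rw [List.getLast?_eq_getLast hne]
  have hlast_mem := List.getLast_mem hne
  have hdecomp : l.dropLast ++ [l.getLast hne] = l := List.dropLast_concat_getLast hne
  rw [← hdecomp] at hs hK
  rcases List.mem_append.mp hK with h | h
  · rw [List.pairwise_append] at hs
    have := hs.2.2 K h (l.getLast hne) (by simp)
    have := hmax (l.getLast hne) hlast_mem
    omega
  · simp only [List.mem_singleton] at h
    rw [h]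

theorem dVal (trees : List Int) (i : Nat) :
    (match ((List.range i).filter (survives trees (i+1))).reverse with
      | [] => (i : Int)
      | k :: _ => (i : Int) - (k : Int)) = specVal trees i := by
  rcases Nat.eq_zero_or_pos i with hi | hi
  · subst hi; simp [specVal, gIdx]
  obtain ⟨n, rfl⟩ : ∃ n, i = n + 1 := ⟨i - 1, by omega⟩
  set v := trees.getD (n+1) 0 with hv
  have hspec : specVal trees (n+1) = ((n+1 : Nat) : Int) - (gIdx trees v n : Int) := by
    unfold specVal
    rw [Nat.add_sub_cancel, ← hv]
  rcases gIdx_cases trees v n with ⟨h0, hall⟩ | ⟨h1, h2, h3, h4⟩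
  · have hzero : ∀ k ∈ (List.range (n+1)).filter (survives trees (n+2)), k = 0 := by
      intro k hk
      obtain ⟨hki, hge⟩ := mem_filter_succ trees (n+1) k hk
      by_contra hne
      exact absurd (hall k (by omega) (by omega)) (not_lt.mpr hge)
    cases hr : ((List.range (n+1)).filter (survives trees (n+2))).reverse with
    | nil => rw [hspec, h0]; simp
    | cons k t =>
      have hk : k ∈ (List.range (n+1)).filter (survives trees (n+2)) := by
        rw [← List.mem_reverse, hr]; simp
      rw [hspec, h0, hzero k hk]
  · set K := gIdx trees v n with hK
    have hKmem : K ∈ (List.range (n+1)).filter (survives trees (n+2)) := by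
      rw [List.mem_filter, List.mem_range]
      refine ⟨by omega, ?_⟩
      simp only [survives, List.all_eq_true, List.mem_range, decide_eq_true_eq]
      intro m hm hKm
      rcases Nat.lt_or_ge m (n+1) with h | h
      · exact le_trans (le_of_lt (h4 m hKm (by omega))) h3
      · have hmn : m = n + 1 := by omega
        subst hmn; exact h3
    have hmax : ∀ x ∈ (List.range (n+1)).filter (survives trees (n+2)), x ≤ K := by
      intro x hx
      obtain ⟨hxi, hge⟩ := mem_filter_succ trees (n+1) x hx
      by_contra hgt
      exact absurd (h4 x (by omega) (by omega)) (not_lt.mpr hge)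
    have hsorted : ((List.range (n+1)).filter (survives trees (n+2))).Pairwise (· < ·) :=
      List.Pairwise.sublist List.filter_sublist List.pairwise_lt_range
    have hhead := maxLast _ K hsorted hKmem hmax
    cases hr : ((List.range (n+1)).filter (survives trees (n+2))).reverse with
    | nil => rw [hr] at hhead; simp at hhead
    | cons k t =>
      rw [hr] at hhead
      simp only [List.head?_cons, Option.some.injEq] at hhead
      rw [hhead, hspec]

theorem mainLoopB_cons (trees : List Int) (i : Nat) (v : Int) (rest : List Int)
    (s : List Nat) (acc : List Int) :
    mainLoopB trees i (v :: rest) s acc =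
      mainLoopB trees (i+1) rest (i :: popLoopB trees v s)
        ((match popLoopB trees v s with
          | [] => (i : Int)
          | k :: _ => (i : Int) - (k : Int)) :: acc) := rfl

theorem mainB_inv (trees : List Int) :
    ∀ (rest : List Int) (i : Nat) (acc : List Int), trees.drop i = rest →
      mainLoopB trees i rest ((stkList trees i).reverse) acc
        = acc.reverse ++ (List.range' i rest.length).map (specVal trees) := by
  intro rest
  induction rest with
  | nil => intro i acc _; simp [mainLoopB]
  | cons v rest ih =>
    intro i acc hdrop
    have hv : trees.getD i 0 = v := by
      have h0 : trees[i]? = some v := by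
        have h : (trees.drop i)[0]? = trees[i + 0]? := List.getElem?_drop
        rw [hdrop] at h
        simpa using h.symm
      simp [List.getD_eq_getElem?_getD, h0]
    have hstep : popLoopB trees v ((stkList trees i).reverse)
        = ((List.range i).filter (survives trees (i+1))).reverse := by
      rw [← hv]; exact stack_step trees i
    have hpush : (i :: ((List.range i).filter (survives trees (i+1))).reverse)
        = (stkList trees (i+1)).reverse := by
      rw [stk_succ]; simp
    have hdrop' : trees.drop (i+1) = rest := by
      have h : (trees.drop i).drop 1 = trees.drop (i + 1) := List.drop_drop
      rw [hdrop] at h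
      rw [← h]
      rfl
    rw [mainLoopB_cons, hstep, hpush, dVal, ih (i+1) _ hdrop']
    simp [List.range'_succ]

theorem portB_eq_spec (trees : List Int) :
    create_view_map_2d_alt trees = (List.range trees.length).map (specVal trees) := by
  have h := mainB_inv trees trees 0 [] (by simp)
  simp only [stkList, List.range_zero, List.filter_nil, List.reverse_nil] at h
  rw [create_view_map_2d_alt, h, List.range_eq_range']
  simp

-- ===== VERDICT (by name: the statement is the Claim_ definition above) =====
theorem create_view_map_2d_spec : Claim_equal_create_view_map_2d := by
  intro trees _
  unfold Spec_create_view_map_2d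
  rw [portA_eq_spec, portB_eq_spec]
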